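-- pv_equiv track=rewrite | github.com/jakobkhansen/KattisSolutions | symmetricorder/symmetricorder.py | sortSet
-- ===== SOURCE A (Python) =====
-- def sortSet(names):
--
--     newNames = [""]*len(names)
--
--     leftIndex = 0
--     rightIndex = len(names) - 1
--     for i in range(0, len(names), 2):
--         newNames[leftIndex] = names[i]
--
--         if (i + 1) < len(names):
--             newNames[rightIndex] = names[i+1]
--
--         leftIndex += 1
--         rightIndex -= 1
--
--     return "\n".join(newNames) + "\n"
-- ===== SOURCE B (Python) =====
-- def sortSet(names):
--     front = []
--     back = []
--     for i, name in enumerate(names):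
--         if i % 2 == 0:
--             front.append(name)
--         else:
--             back.append(name)
--     back.reverse()
--     return "\n".join(front + back) + "\n"
-- ===== Notes on version B (the rewrite author's own statement) =====
-- stated objective: simpler
-- what changed: Replaces A's preallocated array with two-pointer leftIndex/rightIndex index bookkeeping by a one-pass parity partition: even-indexed names go to a front list, odd-indexed names to a back list which is reversed and appended.
import Mathlib
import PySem

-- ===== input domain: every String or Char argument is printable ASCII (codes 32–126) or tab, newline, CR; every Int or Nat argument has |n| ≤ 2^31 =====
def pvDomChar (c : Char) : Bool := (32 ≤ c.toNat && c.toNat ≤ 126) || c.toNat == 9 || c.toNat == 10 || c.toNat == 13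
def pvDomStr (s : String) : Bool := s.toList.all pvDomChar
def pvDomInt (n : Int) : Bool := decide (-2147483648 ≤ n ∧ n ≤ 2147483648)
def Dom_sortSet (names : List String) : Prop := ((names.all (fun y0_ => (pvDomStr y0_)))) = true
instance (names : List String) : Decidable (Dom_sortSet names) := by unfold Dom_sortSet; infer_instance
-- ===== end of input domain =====

-- B replaces A's preallocated array with two-pointer index bookkeeping by a one-pass
-- parity partition: even positions go to a front list, odd positions to a back list,
-- which is reversed and appended; objective: simpler.

-- ===== PORT A =====
-- loop body of A's for-loop; state = (newNames, leftIndex, rightIndex).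
-- names[i] is ported as pyGetD: every i the loop produces satisfies 0 ≤ i < len(names),
-- so Python's indexing never raises and the total form is exact here.
def sortSetStep (names : List String) (st : List String × Int × Int) (i : Int) :
    List String × Int × Int :=
  let acc := PySem.List.pySetD st.1 st.2.1 (PySem.List.pyGetD names i "")
  let acc := if i + 1 < (names.length : Int) then
      PySem.List.pySetD acc st.2.2 (PySem.List.pyGetD names (i + 1) "")
    else acc
  (acc, st.2.1 + 1, st.2.2 - 1)

def sortSet (names : List String) : String :=
  let st := (PySem.List.pyRange 0 (names.length : Int) 2).foldl (sortSetStep names)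
    (List.replicate names.length "", 0, (names.length : Int) - 1)
  PySem.Str.join "\n" st.1 ++ "\n"

-- ===== PORT B =====
-- for i, name in enumerate(names): append to front if i % 2 == 0 else to back;
-- then back.reverse() and join.  (Lean's % on Int agrees with Python's % here: the
-- divisor 2 is positive and both are the always-nonnegative remainder.)
def sortSet_alt (names : List String) : String :=
  let st := (PySem.List.enumerate names 0).foldl
    (fun (st : List String × List String) p =>
      if p.1 % 2 = 0 then (st.1 ++ [p.2], st.2) else (st.1, st.2 ++ [p.2]))
    ([], [])
  PySem.Str.join "\n" (st.1 ++ st.2.reverse) ++ "\n"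

-- ===== PRECONDITION & SPEC =====
def Spec_sortSet (names : List String) (out : String) : Prop := out = sortSet_alt names
instance (names : List String) (out : String) : Decidable (Spec_sortSet names out) := by unfold Spec_sortSet; infer_instance

-- ===== CLAIM (what is proved, stated in full; the proofs are below) =====
def Claim_equal_sortSet : Prop := ∀ (names : List String), Dom_sortSet names → Spec_sortSet names (sortSet names)

-- ===== LEMMAS AND PROOFS =====

-- the even- and odd-indexed elements of a list, used only by the proofs
def evens : List String → List String
  | [] => []
  | [a] => [a]
  | a :: _ :: r => a :: evens r

def odds : List String → List String
  | [] => []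
  | [_] => []
  | _ :: b :: r => b :: odds r

theorem length_evens (l : List String) : (evens l).length = (l.length + 1) / 2 := by
  fun_induction evens l <;> simp_all
  all_goals omega

theorem length_odds (l : List String) : (odds l).length = l.length / 2 := by
  fun_induction odds l <;> simp_all
  all_goals omega

theorem enumerate_cons (x : String) (xs : List String) (t : Int) :
    PySem.List.enumerate (x :: xs) t = (t, x) :: PySem.List.enumerate xs (t + 1) := by
  simp [PySem.List.enumerate]

-- B's loop partitions by index parity: starting at an even index s it appends the
-- even-indexed elements to f and the odd-indexed ones to b
theorem part_inv (l : List String) : ∀ (f b : List String) (s : Int), 0 ≤ s → s % 2 = 0 →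
    (PySem.List.enumerate l s).foldl
      (fun (st : List String × List String) p =>
        if p.1 % 2 = 0 then (st.1 ++ [p.2], st.2) else (st.1, st.2 ++ [p.2]))
      (f, b) = (f ++ evens l, b ++ odds l) := by
  induction l using evens.induct with
  | case1 => intro f b s _ _; simp [PySem.List.enumerate, evens, odds]
  | case2 a =>
      intro f b s _ he
      simp [PySem.List.enumerate, evens, odds, he]
  | case3 a c r ih =>
      intro f b s hs he
      have h1 : ¬ ((s + 1) % 2 = 0) := by omega
      have h2 : (s + 1 + 1) % 2 = 0 := by omega
      rw [enumerate_cons, enumerate_cons, List.foldl_cons, List.foldl_cons]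
      dsimp only
      rw [if_pos he, if_neg h1, ih (f ++ [a]) (b ++ [c]) (s + 1 + 1) (by omega) h2]
      simp [evens, odds]

theorem getElem?_evens (l : List String) (t : Nat) (h : 2 * t < l.length) :
    (evens l)[t]? = l[2 * t]? := by
  induction l using evens.induct generalizing t with
  | case1 => simp at h
  | case2 a =>
      simp at h
      have ht0 : t = 0 := by omega
      subst ht0
      simp [evens]
  | case3 a b r ih =>
      match t with
      | 0 => simp [evens]
      | t + 1 =>
          have h' : 2 * t < r.length := by simp at h; omega
          have : 2 * (t + 1) = (2 * t) + 1 + 1 := by omega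
          simp [evens, this, ih t h']

theorem getElem?_odds (l : List String) (t : Nat) (h : 2 * t + 1 < l.length) :
    (odds l)[t]? = l[2 * t + 1]? := by
  induction l using odds.induct generalizing t with
  | case1 => simp at h
  | case2 a => simp at h
  | case3 a b r ih =>
      match t with
      | 0 => simp [odds]
      | t + 1 =>
          have h' : 2 * t + 1 < r.length := by simp at h; omega
          have : 2 * (t + 1) + 1 = (2 * t + 1) + 1 + 1 := by omega
          simp [odds, this, ih t h']

theorem set_replicate_last (m : Nat) (v : String) :
    (List.replicate (m + 1) ("" : String)).set m v = List.replicate m "" ++ [v] := by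
  induction m with
  | zero => simp
  | succ m ih => simpa [List.replicate_succ] using ih

-- loop invariant: after t iterations the array holds the first t evens at the front,
-- the first t odds reversed at the back, and blanks in the middle
theorem loop_inv (names : List String) (t : Nat) (ht : 2 * t ≤ names.length + 1) :
    (List.range t).foldl (fun st (j : Nat) => sortSetStep names st (0 + 2 * (j : Int)))
      (List.replicate names.length "", 0, (names.length : Int) - 1) =
    ((evens names).take t ++ List.replicate (names.length - 2 * t) "" ++
        ((odds names).take t).reverse,
      (t : Int), (names.length : Int) - 1 - t) := by
  induction t with
  | zero => simp
  | succ t ih =>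
      have hlt : 2 * t < names.length := by omega
      have hE : ((evens names).take t).length = t := by
        rw [List.length_take, length_evens]; omega
      have hO : ((odds names).take t).length = t := by
        rw [List.length_take, length_odds]; omega
      rw [List.range_succ, List.foldl_append, ih (by omega)]
      simp only [List.foldl_cons, List.foldl_nil]
      unfold sortSetStep
      dsimp only
      have hi : (0 + 2 * (t : Int)) = ((2 * t : Nat) : Int) := by push_cast; ring
      have hv1 : PySem.List.pyGetD names (0 + 2 * (t : Int)) "" = names.getD (2 * t) "" := by
        rw [hi, PySem.List.pyGetD_natCast]
      have hget1 : names[2 * t]? = some (names.getD (2 * t) "") := by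
        rw [List.getD_eq_getElem?_getD, List.getElem?_eq_getElem hlt]; simp
      have hEsucc : (evens names).take (t + 1) =
          (evens names).take t ++ [names.getD (2 * t) ""] := by
        rw [List.take_add_one, getElem?_evens names t hlt, hget1]; rfl
      -- first write: newNames[leftIndex] = names[i]
      have hset1 :
          PySem.List.pySetD
            ((evens names).take t ++ List.replicate (names.length - 2 * t) "" ++
              ((odds names).take t).reverse) (t : Int) (names.getD (2 * t) "") =
          (evens names).take (t + 1) ++ List.replicate (names.length - 2 * t - 1) "" ++
            ((odds names).take t).reverse := by
        rw [PySem.List.pySetD_natCast]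
        have hm : names.length - 2 * t = (names.length - 2 * t - 1) + 1 := by omega
        rw [List.append_assoc, List.set_append]
        rw [hE, if_neg (lt_irrefl t), Nat.sub_self]
        rw [hm, List.replicate_succ, List.cons_append, List.set_cons_zero]
        rw [hEsucc]
        simp [List.append_assoc]
      rw [hv1, hset1]
      by_cases hodd : 2 * t + 1 < names.length
      · -- second write fires: newNames[rightIndex] = names[i+1]
        have hcond : (0 + 2 * (t : Int)) + 1 < (names.length : Int) := by omega
        rw [if_pos hcond]
        have hi2 : (0 + 2 * (t : Int)) + 1 = ((2 * t + 1 : Nat) : Int) := by push_cast; ring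
        have hv2 : PySem.List.pyGetD names ((0 + 2 * (t : Int)) + 1) "" =
            names.getD (2 * t + 1) "" := by rw [hi2, PySem.List.pyGetD_natCast]
        have hget2 : names[2 * t + 1]? = some (names.getD (2 * t + 1) "") := by
          rw [List.getD_eq_getElem?_getD, List.getElem?_eq_getElem hodd]; simp
        have hOsucc : (odds names).take (t + 1) =
            (odds names).take t ++ [names.getD (2 * t + 1) ""] := by
          rw [List.take_add_one, getElem?_odds names t hodd, hget2]; rfl
        have hE1 : ((evens names).take (t + 1)).length = t + 1 := by
          rw [List.length_take, length_evens]; omega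
        have hr : ((names.length : Int) - 1 - (t : Int)) =
            (((names.length - 1 - t : Nat)) : Int) := by omega
        rw [hv2, hr, PySem.List.pySetD_natCast]
        rw [List.append_assoc, List.set_append, hE1]
        have hge : ¬ (names.length - 1 - t < t + 1) := by omega
        rw [if_neg hge, List.set_append]
        have hin : names.length - 1 - t - (t + 1) <
            (List.replicate (names.length - 2 * t - 1) ("" : String)).length := by
          simp; omega
        rw [if_pos hin]
        have hm1 : names.length - 2 * t - 1 = (names.length - 2 * (t + 1)) + 1 := by omega
        have hm2 : names.length - 1 - t - (t + 1) = names.length - 2 * (t + 1) := by omega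
        rw [hm2, hm1, set_replicate_last]
        rw [hOsucc]
        simp only [Prod.mk.injEq]
        refine ⟨?_, ?_, ?_⟩
        · simp [List.append_assoc, List.reverse_append]
        · push_cast; ring
        · omega
      · -- len(names) = 2t+1: the guarded write is skipped
        have hcond : ¬ ((0 + 2 * (t : Int)) + 1 < (names.length : Int)) := by
          omega
        rw [if_neg hcond]
        have hn : names.length = 2 * t + 1 := by omega
        have hOfull : (odds names).take (t + 1) = (odds names).take t := by
          have h1 : (odds names).length = t := by rw [length_odds, hn]; omega
          rw [List.take_of_length_le (by omega), List.take_of_length_le (by omega)]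
        simp only [Prod.mk.injEq]
        refine ⟨?_, ?_, ?_⟩
        · have he : names.length - 2 * t - 1 = names.length - 2 * (t + 1) := by omega
          rw [hOfull, he]
        · push_cast; ring
        · push_cast; ring

theorem fold_eq_evens_odds (names : List String) :
    ((PySem.List.pyRange 0 (names.length : Int) 2).foldl (sortSetStep names)
      (List.replicate names.length "", 0, (names.length : Int) - 1)).1 =
    evens names ++ (odds names).reverse := by
  rw [PySem.List.pyRange_of_pos 0 (names.length : Int) (by norm_num : (0:Int) < 2)]
  by_cases h0 : names = []
  · subst h0; simp [evens, odds]
  · have hn : 0 < names.length := List.length_pos_iff.mpr h0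
    have hcond : (0 : Int) < (names.length : Int) := by exact_mod_cast hn
    rw [if_pos hcond]
    have hk : (((names.length : Int) - 0 + 2 - 1) / 2).toNat = (names.length + 1) / 2 := by
      omega
    rw [hk, List.foldl_map, loop_inv names ((names.length + 1) / 2) (by omega)]
    have hEfull : (evens names).take ((names.length + 1) / 2) = evens names :=
      List.take_of_length_le (by rw [length_evens])
    have hOfull : (odds names).take ((names.length + 1) / 2) = odds names :=
      List.take_of_length_le (by rw [length_odds]; omega)
    have hz : names.length - 2 * ((names.length + 1) / 2) = 0 := by omega
    simp [hEfull, hOfull, hz]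

-- ===== VERDICT (by name: the statement is the Claim_ definition above) =====
theorem sortSet_spec : Claim_equal_sortSet := by
  intro names _
  unfold Spec_sortSet
  simp only [sortSet, sortSet_alt]
  rw [fold_eq_evens_odds, part_inv names [] [] 0 (by norm_num) (by norm_num)]
  simp
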